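-- pv_equiv track=rewrite | github.com/useXR/devpowers | hooks/subagent-review.py | check_review_done
-- ===== SOURCE A (Python) =====
-- def check_review_done(transcript: str) -> bool:
--     """Check if code review was already performed."""
--     review_indicators = [
--         'code-reviewer',
--         'code review',
--         'reviewed the code',
--         'review complete'
--     ]
--
--     transcript_lower = transcript.lower()
--     return any(ind in transcript_lower for ind in review_indicators)
-- ===== SOURCE B (Python) =====
-- # Alternative: one left-to-right scan that tries a case-insensitive prefix match of each
-- # phrase at every position, instead of building a lowered copy and running four substring searches.
--
-- _PHRASES = ('code-reviewer', 'code review', 'reviewed the code', 'review complete')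
--
--
-- def _starts_ci(s, i, p):
--     """Does s, lowered, start with phrase p at position i?"""
--     if i + len(p) > len(s):
--         return False
--     return all(s[i + k].lower() == p[k] for k in range(len(p)))
--
--
-- def check_review_done(transcript: str) -> bool:
--     """Check if code review was already performed."""
--     return any(_starts_ci(transcript, i, p)
--                for i in range(len(transcript))
--                for p in _PHRASES)
-- ===== Notes on version B (the rewrite author's own statement) =====
-- stated objective: alternative
-- what changed: B replaces A's lowercased-copy plus four independent substring searches by a single left-to-right scan that attempts a case-insensitive prefix match of each phrase at every position, never materialising a lowered transcript.
import Mathlib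
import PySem

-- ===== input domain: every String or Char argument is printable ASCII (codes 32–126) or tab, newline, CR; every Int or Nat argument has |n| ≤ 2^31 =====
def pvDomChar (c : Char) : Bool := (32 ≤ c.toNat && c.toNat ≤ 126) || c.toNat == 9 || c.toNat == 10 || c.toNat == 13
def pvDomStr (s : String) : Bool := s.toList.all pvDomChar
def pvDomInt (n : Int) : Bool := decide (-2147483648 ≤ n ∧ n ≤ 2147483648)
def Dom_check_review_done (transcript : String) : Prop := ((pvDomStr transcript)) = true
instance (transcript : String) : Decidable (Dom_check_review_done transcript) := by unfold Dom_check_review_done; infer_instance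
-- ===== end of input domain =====

-- B replaces A's lowered-copy-plus-four-substring-searches by a single left-to-right scan
-- trying a case-insensitive prefix match of each phrase at every position (alternative, same cost class).


-- ===== PORT A =====
def check_review_done (transcript : String) : Bool :=
  let review_indicators : List String :=
    ["code-reviewer", "code review", "reviewed the code", "review complete"]
  let transcript_lower := PySem.Str.lower transcript
  review_indicators.any (fun ind => PySem.Str.isIn ind transcript_lower)

-- ===== PORT B =====
-- the tuple _PHRASES of Source B
def pvPhrases : List (List Char) :=
  ["code-reviewer".toList, "code review".toList, "reviewed the code".toList, "review complete".toList]

-- _starts_ci of Source B, on the suffix of the transcript starting at position i: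
-- the 'all(... for k in range(len(p)))' comprehension becomes recursion over the phrase
def pvStartsCi : List Char → List Char → Bool
  | _, [] => true
  | [], _ :: _ => false
  | c :: s, q :: qs => (PySem.Chars.lowerChar c == q) && pvStartsCi s qs

-- the 'any(... for i in range(len(transcript)) for p in _PHRASES)' scan: positions outer, phrases inner
def pvScan : List Char → Bool
  | [] => false
  | c :: t => pvPhrases.any (fun p => pvStartsCi (c :: t) p) || pvScan t

def check_review_done_alt (transcript : String) : Bool :=
  pvScan transcript.toList

-- ===== PRECONDITION & SPEC =====
def Spec_check_review_done (transcript : String) (out : Bool) : Prop := out = check_review_done_alt transcript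
instance (transcript : String) (out : Bool) : Decidable (Spec_check_review_done transcript out) := by unfold Spec_check_review_done; infer_instance

-- ===== CLAIM (what is proved, stated in full; the proofs are below) =====
def Claim_equal_check_review_done : Prop := ∀ (transcript : String), Dom_check_review_done transcript → Spec_check_review_done transcript (check_review_done transcript)

-- ===== LEMMAS AND PROOFS =====

-- pvStartsCi matches exactly when the phrase is a prefix of the lowered suffix
theorem pvStartsCi_iff (p s : List Char) :
    pvStartsCi s p = true ↔ p <+: s.map PySem.Chars.lowerChar := by
  induction p generalizing s with
  | nil => simp [pvStartsCi]
  | cons q qs ih =>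
    cases s with
    | nil => simp [pvStartsCi]
    | cons c t =>
      simp only [pvStartsCi, Bool.and_eq_true, beq_iff_eq, List.map_cons,
        List.cons_prefix_cons, ih]
      tauto

-- the scan finds a phrase exactly when some phrase is a prefix of some suffix of the lowered text
theorem pvScan_iff (s : List Char) :
    pvScan s = true ↔ ∃ p ∈ pvPhrases, ∃ j, p <+: (s.map PySem.Chars.lowerChar).drop j := by
  induction s with
  | nil =>
    simp only [pvScan, List.map_nil, List.drop_nil, List.prefix_nil]
    constructor
    · intro h; exact absurd h (by decide)
    · rintro ⟨p, hp, _, rfl⟩; exact absurd hp (by decide)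
  | cons c t ih =>
    simp only [pvScan, Bool.or_eq_true, List.any_eq_true, pvStartsCi_iff, ih]
    constructor
    · rintro (⟨p, hp, h⟩ | ⟨p, hp, j, h⟩)
      · exact ⟨p, hp, 0, by simpa using h⟩
      · exact ⟨p, hp, j + 1, by simpa using h⟩
    · rintro ⟨p, hp, j, h⟩
      cases j with
      | zero => exact Or.inl ⟨p, hp, by simpa using h⟩
      | succ k => exact Or.inr ⟨p, hp, k, by simpa using h⟩

-- A's membership tests, characterised the same way
theorem check_review_done_iff (s : String) :
    check_review_done s = true ↔
      ∃ p ∈ pvPhrases, ∃ j, p <+: (s.toList.map PySem.Chars.lowerChar).drop j := by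
  simp only [check_review_done, List.any_eq_true, PySem.Str.isIn_iff_infix,
    PySem.Str.toList_lower]
  constructor
  · rintro ⟨ind, hind, h⟩
    obtain ⟨j, hj⟩ := (PySem.Chars.exists_prefix_drop_iff_isIn (sub := ind.toList)
      (s := PySem.Chars.lower s.toList)).2 ((PySem.Chars.isIn_iff_infix _ _).2 h)
    refine ⟨ind.toList, ?_, j, by simpa [PySem.Chars.lower] using hj⟩
    simp only [pvPhrases, List.mem_cons, List.not_mem_nil, or_false] at hind ⊢
    rcases hind with rfl | rfl | rfl | rfl <;> simp
  · rintro ⟨p, hp, j, hj⟩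
    simp only [pvPhrases, List.mem_cons, List.not_mem_nil, or_false] at hp
    have key : ∀ ind : String, ind.toList = p →
        ind ∈ ["code-reviewer", "code review", "reviewed the code", "review complete"] →
        ∃ ind ∈ ["code-reviewer", "code review", "reviewed the code", "review complete"],
          ind.toList <:+: PySem.Chars.lower s.toList := by
      intro ind hind hmem
      refine ⟨ind, hmem, (PySem.Chars.isIn_iff_infix _ _).1 ?_⟩
      exact (PySem.Chars.exists_prefix_drop_iff_isIn _ _).1 ⟨j, by simpa [PySem.Chars.lower, hind] using hj⟩
    rcases hp with rfl | rfl | rfl | rfl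
    · exact key _ rfl (by simp)
    · exact key _ rfl (by simp)
    · exact key _ rfl (by simp)
    · exact key _ rfl (by simp)

-- ===== VERDICT (by name: the statement is the Claim_ definition above) =====
theorem check_review_done_spec : Claim_equal_check_review_done := by
  intro transcript _
  unfold Spec_check_review_done check_review_done_alt
  rw [Bool.eq_iff_iff, check_review_done_iff, pvScan_iff]
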